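-- pv_equiv track=rewrite | github.com/phanghonghao/GUI-seedance-video-toolkit | commands/config.py | _extract_major_version
-- ===== SOURCE A (Python) =====
-- def _extract_major_version(version_line: str) -> int | None:
--     text = version_line.strip()
--     if text.startswith("v"):
--         text = text[1:]
--     digits = []
--     for char in text:
--         if char.isdigit():
--             digits.append(char)
--             continue
--         if digits:
--             break
--     if not digits:
--         return None
--     return int("".join(digits))
-- ===== SOURCE B (Python) =====
-- def _extract_major_version(version_line: str) -> int | None:
--     text = version_line.strip()
--     if text.startswith("v"):
--         text = text[1:]
--     i = 0
--     while i < len(text) and not text[i].isdigit():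
--         i += 1
--     j = i
--     while j < len(text) and text[j].isdigit():
--         j += 1
--     return int(text[i:j]) if j > i else None
-- ===== Notes on version B (the rewrite author's own statement) =====
-- stated objective: simpler
-- what changed: Replaced the single accumulator loop with break-on-state by a plain two-index scan: advance i past leading non-digits, advance j past the digit run, then convert the one slice text[i:j]; no digits list, no break flag.
import Mathlib
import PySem

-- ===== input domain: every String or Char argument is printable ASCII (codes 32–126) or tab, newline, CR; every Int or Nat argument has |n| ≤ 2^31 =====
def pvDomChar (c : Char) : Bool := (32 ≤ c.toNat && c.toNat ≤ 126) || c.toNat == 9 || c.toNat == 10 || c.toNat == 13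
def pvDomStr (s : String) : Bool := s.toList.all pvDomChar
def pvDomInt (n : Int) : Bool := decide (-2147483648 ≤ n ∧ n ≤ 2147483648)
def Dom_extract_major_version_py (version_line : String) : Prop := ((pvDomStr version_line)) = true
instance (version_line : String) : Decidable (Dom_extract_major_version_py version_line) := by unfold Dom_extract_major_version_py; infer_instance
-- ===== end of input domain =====

-- B replaces A's accumulator loop with break-on-state by a two-index scan (skip non-digits, then advance past the digit run, slice once); same cost, simpler.

-- ===== PORT A =====
-- the for-loop of A: state is the collected digits list; a non-digit breaks once digits is nonempty
def pvLoopA : List Char → List Char → List Char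
  | [], digits => digits
  | c :: rest, digits =>
    if PySem.Chars.isdigit c then pvLoopA rest (digits ++ [c])
    else if digits ≠ [] then digits
    else pvLoopA rest digits

def extract_major_version_py (version_line : String) : Option Int :=
  let text := PySem.Chars.strip version_line.toList
  let text := if PySem.Chars.startswith text ['v'] then PySem.Chars.slice text (some 1) none else text
  let digits := pvLoopA text []
  if digits = [] then none
  else PySem.Int.ofChars? digits

-- ===== PORT B =====
-- first while loop of B: advance i while i < len(text) and text[i] is not a digit
def pvSkipI (ts : List Char) (i : Nat) : Nat :=
  if h : i < ts.length then
    if ¬ PySem.Chars.isdigit ts[i] then pvSkipI ts (i + 1) else i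
  else i
termination_by ts.length - i

-- second while loop of B: advance j while j < len(text) and text[j] is a digit
def pvCollectI (ts : List Char) (j : Nat) : Nat :=
  if h : j < ts.length then
    if PySem.Chars.isdigit ts[j] then pvCollectI ts (j + 1) else j
  else j
termination_by ts.length - j

def extract_major_version_py_alt (version_line : String) : Option Int :=
  let text := PySem.Chars.strip version_line.toList
  let text := if PySem.Chars.startswith text ['v'] then PySem.Chars.slice text (some 1) none else text
  let i := pvSkipI text 0
  let j := pvCollectI text i
  if i < j then PySem.Int.ofChars? (PySem.List.slice text (some (i : Int)) (some (j : Int)))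
  else none

-- ===== PRECONDITION & SPEC =====
def Spec_extract_major_version_py (version_line : String) (out : Option Int) : Prop := out = extract_major_version_py_alt version_line
instance (version_line : String) (out : Option Int) : Decidable (Spec_extract_major_version_py version_line out) := by unfold Spec_extract_major_version_py; infer_instance

-- ===== CLAIM (what is proved, stated in full; the proofs are below) =====
def Claim_equal_extract_major_version_py : Prop := ∀ (version_line : String), Dom_extract_major_version_py version_line → Spec_extract_major_version_py version_line (extract_major_version_py version_line)

-- ===== LEMMAS AND PROOFS =====
-- proof-only helpers: the suffix forms of B's two index loops
def pvSkip : List Char → List Char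
  | [] => []
  | c :: rest => if PySem.Chars.isdigit c then c :: rest else pvSkip rest

def pvCollect : List Char → List Char
  | [] => []
  | c :: rest => if PySem.Chars.isdigit c then c :: pvCollect rest else []

-- A's loop, once digits is nonempty, appends the leading digit run of the rest
theorem pvLoopA_nonempty (ts : List Char) (acc : List Char) (h : acc ≠ []) :
    pvLoopA ts acc = acc ++ pvCollect ts := by
  induction ts generalizing acc with
  | nil => simp [pvLoopA, pvCollect]
  | cons c rest ih =>
    by_cases hd : PySem.Chars.isdigit c
    · simp [pvLoopA, pvCollect, hd, ih (acc ++ [c]) (by simp)]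
    · simp [pvLoopA, pvCollect, hd, h]

-- A's loop = skip non-digits, then collect the digit run
theorem pvLoopA_eq (ts : List Char) : pvLoopA ts [] = pvCollect (pvSkip ts) := by
  induction ts with
  | nil => rfl
  | cons c rest ih =>
    by_cases hd : PySem.Chars.isdigit c
    · simp [pvLoopA, pvSkip, pvCollect, hd, pvLoopA_nonempty rest [c] (by simp)]
    · simp [pvLoopA, pvSkip, hd, ih]

theorem pvSkipI_drop (ts : List Char) (i : Nat) :
    ts.drop (pvSkipI ts i) = pvSkip (ts.drop i) := by
  induction i using pvSkipI.induct ts with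
  | case1 x h hd ih =>
    rw [pvSkipI]
    simp only [h, dite_true]
    rw [if_pos (by simpa using hd), ih, List.drop_eq_getElem_cons h]
    simp only [pvSkip]
    rw [if_neg (by simpa using hd)]
  | case2 x h hd =>
    rw [pvSkipI]
    simp only [h, dite_true]
    rw [if_neg (by simpa using hd), List.drop_eq_getElem_cons h]
    simp only [pvSkip]
    rw [if_pos (by simpa using hd), ← List.drop_eq_getElem_cons h]
  | case3 x h =>
    rw [pvSkipI]
    simp [h, List.drop_eq_nil_of_le (by omega : ts.length ≤ x), pvSkip]

theorem pvCollectI_ge (ts : List Char) (j : Nat) : j ≤ pvCollectI ts j := by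
  induction j using pvCollectI.induct ts with
  | case1 x h hd ih => rw [pvCollectI]; simp only [h, dite_true, hd, if_true]; omega
  | case2 x h hd => rw [pvCollectI]; simp [h, hd]
  | case3 x h => rw [pvCollectI]; simp [h]

theorem pvCollectI_take (ts : List Char) (j : Nat) :
    pvCollect (ts.drop j) = (ts.drop j).take (pvCollectI ts j - j) := by
  induction j using pvCollectI.induct ts with
  | case1 x h hd ih =>
    rw [pvCollectI]
    simp only [h, dite_true, hd, if_true]
    rw [List.drop_eq_getElem_cons h]
    have hge := pvCollectI_ge ts (x + 1)
    have harith : pvCollectI ts (x + 1) - x = (pvCollectI ts (x + 1) - (x + 1)) + 1 := by omega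
    simp only [pvCollect, hd, if_true, harith, ih]
    rw [List.take_succ_cons]
  | case2 x h hd =>
    rw [pvCollectI]
    simp only [h, dite_true, hd]
    rw [List.drop_eq_getElem_cons h]
    simp [pvCollect, hd]
  | case3 x h =>
    rw [pvCollectI]
    simp [h, List.drop_eq_nil_of_le (by omega : ts.length ≤ x), pvCollect]

theorem pvCollectI_pos_iff (ts : List Char) (j : Nat) :
    j < pvCollectI ts j ↔ pvCollect (ts.drop j) ≠ [] := by
  by_cases h : j < ts.length
  · rw [List.drop_eq_getElem_cons h]
    by_cases hd : PySem.Chars.isdigit ts[j]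
    · have : pvCollectI ts j = pvCollectI ts (j + 1) := by rw [pvCollectI]; simp [h, hd]
      have hge := pvCollectI_ge ts (j + 1)
      simp [pvCollect, hd, this]; omega
    · have : pvCollectI ts j = j := by rw [pvCollectI]; simp [h, hd]
      simp [pvCollect, hd, this]
  · have hd : ts.drop j = [] := List.drop_eq_nil_of_le (by omega)
    have : pvCollectI ts j = j := by rw [pvCollectI]; simp [h]
    simp [hd, pvCollect, this]

-- ===== VERDICT (by name: the statement is the Claim_ definition above) =====
theorem extract_major_version_py_spec : Claim_equal_extract_major_version_py := by
  intro v _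
  unfold Spec_extract_major_version_py extract_major_version_py extract_major_version_py_alt
  simp only [pvLoopA_eq]
  set ts := (if PySem.Chars.startswith (PySem.Chars.strip v.toList) ['v']
    then PySem.Chars.slice (PySem.Chars.strip v.toList) (some 1) none
    else PySem.Chars.strip v.toList) with hts
  have hskip : pvSkip ts = ts.drop (pvSkipI ts 0) := by
    rw [pvSkipI_drop]; simp
  have hnum : pvCollect (pvSkip ts)
      = PySem.List.slice ts (some ((pvSkipI ts 0 : Nat) : Int)) (some ((pvCollectI ts (pvSkipI ts 0) : Nat) : Int)) := by
    rw [hskip, pvCollectI_take, PySem.List.slice_natCast]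
  have hiff : pvSkipI ts 0 < pvCollectI ts (pvSkipI ts 0) ↔ pvCollect (pvSkip ts) ≠ [] := by
    rw [hskip]; exact pvCollectI_pos_iff ts (pvSkipI ts 0)
  by_cases hne : pvCollect (pvSkip ts) = []
  · simp [hne, (by rw [hiff]; simp [hne] : ¬ pvSkipI ts 0 < pvCollectI ts (pvSkipI ts 0))]
  · have h2 := hiff.mpr hne
    rw [hnum] at hne
    simp [hne, h2, hnum]
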